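/- GENERATED by c/gen_decode.py: decode facts of the image, one per distinct instruction byte string. -/
import UserX.DecodeImage

#decode_all ProgX.Base.Dec
  "415c"  -- pop r12
  "4881fee0ff3f00"  -- cmp rsi,0x3fffe0
  "4889b230008000"  -- mov QWORD PTR [rdx+0x800030],rsi
  "488b342508f01f00"  -- mov rsi,QWORD PTR ds:0x1ff008
  "490fafdd"  -- imul rbx,r13
  "4c01f7"  -- add rdi,r14
  "660f28c8"  -- movapd xmm1,xmm0
  "66480f6ee3"  -- movq xmm4,rbx
  "74cd"  -- je 100d7a
  "794a"  -- jns 10138d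
  "85ff"  -- test edi,edi
  "bf01000000"  -- mov edi,0x1
  "e877f6ffff"  -- call 103200
  "e8e6060000"  -- call 104200
  "ebba"  -- jmp 100d7a
  "f20f110424"  -- movsd QWORD PTR [rsp],xmm0
  "f20f5905c7d60300"  -- mulsd xmm0,QWORD PTR [rip+0x3d6c7]
  "f20f5e0d74e10300"  -- divsd xmm1,QWORD PTR [rip+0x3e174]
  "f7d8"  -- neg eax
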